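-- pv_equiv track=rewrite | github.com/jennyzzt/LLM_debate_on_ARC | ARC_gen_agents2_rounds3_openai/3aa6fb7a/agent1/algo2.py | solve
-- ===== SOURCE A (Python) =====
-- def solve(input_grid):
--     # Copy the input grid to avoid modifying the original grid
--     output_grid = [row[:] for row in input_grid]
--
--     # Define the dimensions of the grid
--     rows, cols = len(input_grid), len(input_grid[0])
--
--     # Define the directions to check for adjacent cells
--     directions = [(-1, 0), (1, 0), (0, -1), (0, 1)]
--
--     # Iterate through each cell in the grid
--     for r in range(rows):
--         for c in range(cols):
--             # If the current cell contains an '8'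
--             if input_grid[r][c] == 8:
--                 # Check all adjacent cells based on the defined directions
--                 for dr, dc in directions:
--                     nr, nc = r + dr, c + dc
--                     # If the adjacent cell is within bounds and contains a '0', change it to '1'
--                     if 0 <= nr < rows and 0 <= nc < cols and input_grid[nr][nc] == 0:
--                         output_grid[nr][nc] = 1
--
--     return output_grid
-- ===== SOURCE B (Python) =====
-- def solve(input_grid):
--     # Pull-style: build each output row locally, reading neighbors of the current cell.
--     rows, cols = len(input_grid), len(input_grid[0])
--     directions = [(-1, 0), (1, 0), (0, -1), (0, 1)]
--     output_grid = []
--     for r, row in enumerate(input_grid):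
--         new_row = list(row)
--         for c in range(cols):
--             if row[c] == 0 and any(
--                     0 <= r + dr < rows and 0 <= c + dc < cols
--                     and input_grid[r + dr][c + dc] == 8
--                     for dr, dc in directions):
--                 new_row[c] = 1
--         output_grid.append(new_row)
--     return output_grid
-- ===== Notes on version B (the rewrite author's own statement) =====
-- stated objective: alternative
-- what changed: A pushes: for each 8 it mutates the 0-neighbours of a shared 2D copy; B pulls: it builds each output row locally, setting a cell to 1 when it is 0 and some in-bounds orthogonal neighbour is 8, so writes never cross rows.
import Mathlib
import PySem

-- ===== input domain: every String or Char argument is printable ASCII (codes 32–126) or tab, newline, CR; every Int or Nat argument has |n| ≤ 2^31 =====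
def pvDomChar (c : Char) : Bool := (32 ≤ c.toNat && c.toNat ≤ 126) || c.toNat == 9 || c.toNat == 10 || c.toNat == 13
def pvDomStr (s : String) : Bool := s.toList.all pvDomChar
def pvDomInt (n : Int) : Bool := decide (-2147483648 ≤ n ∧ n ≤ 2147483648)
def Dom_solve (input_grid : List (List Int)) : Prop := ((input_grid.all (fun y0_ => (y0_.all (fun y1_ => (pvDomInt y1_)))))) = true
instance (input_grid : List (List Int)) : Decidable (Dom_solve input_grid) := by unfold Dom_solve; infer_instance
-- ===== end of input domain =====

-- B rewrites A's "push" (each 8 writes 1 into its 0-neighbours of a mutated 2D copy) as a "pull"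
-- (each output row is built locally: a cell becomes 1 when it is 0 and some in-bounds neighbour is 8);
-- objective: alternative decomposition, same cost.

-- ===== PORT A =====
def pvDirs : List (Int × Int) := [(-1, 0), (1, 0), (0, -1), (0, 1)]

-- input_grid[i][j] (every use below is guarded to be in range within Pre_)
def pvCell (g : List (List Int)) (i j : Int) : Int :=
  PySem.List.pyGetD (PySem.List.pyGetD g i []) j 0

-- output_grid[nr][nc] = 1 (only called with 0 ≤ nr, 0 ≤ nc, both in range)
def pvSet2 (g : List (List Int)) (i j : Int) : List (List Int) :=
  g.modify i.toNat (fun row => row.set j.toNat 1)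

def solve (input_grid : List (List Int)) : List (List Int) :=
  let output_grid := input_grid
  let rows : Int := input_grid.length
  let cols : Int := ((PySem.List.pyGet? input_grid 0).getD []).length
  (PySem.List.pyRange 0 rows 1).foldl (fun g r =>
    (PySem.List.pyRange 0 cols 1).foldl (fun g c =>
      if pvCell input_grid r c = 8 then
        pvDirs.foldl (fun g d =>
          if 0 ≤ r + d.1 ∧ r + d.1 < rows ∧ 0 ≤ c + d.2 ∧ c + d.2 < cols ∧
              pvCell input_grid (r + d.1) (c + d.2) = 0 then
            pvSet2 g (r + d.1) (c + d.2)
          else g) g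
      else g) g) output_grid

-- ===== PORT B =====
def solve_alt (input_grid : List (List Int)) : List (List Int) :=
  let rows : Int := input_grid.length
  let cols : Int := ((PySem.List.pyGet? input_grid 0).getD []).length
  (PySem.List.enumerate input_grid 0).map (fun p =>
    (PySem.List.pyRange 0 cols 1).foldl (fun new_row c =>
      if PySem.List.pyGetD p.2 c 0 = 0 ∧
          pvDirs.any (fun d =>
            decide (0 ≤ p.1 + d.1) && decide (p.1 + d.1 < rows) &&
            decide (0 ≤ c + d.2) && decide (c + d.2 < cols) &&
            decide (pvCell input_grid (p.1 + d.1) (c + d.2) = 8))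
      then new_row.set c.toNat 1 else new_row) p.2)

-- ===== PRECONDITION & SPEC =====
-- Pre_ excludes exactly the inputs on which the Python A raises IndexError: the empty grid
-- (input_grid[0]) and grids with a row shorter than the first row (A reads input_grid[r][c]
-- for every r and every c < len(input_grid[0])).
def Pre_solve (input_grid : List (List Int)) : Prop :=
  input_grid ≠ [] ∧ ∀ row ∈ input_grid, (input_grid.headD []).length ≤ row.length
instance (input_grid : List (List Int)) : Decidable (Pre_solve input_grid) := by
  unfold Pre_solve; infer_instance

def pvWitness_solve : List (List Int) := [[0, 8], [0, 0]]

def Spec_solve (input_grid : List (List Int)) (out : List (List Int)) : Prop := out = solve_alt input_grid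
instance (input_grid : List (List Int)) (out : List (List Int)) : Decidable (Spec_solve input_grid out) := by unfold Spec_solve; infer_instance

-- ===== CLAIM (what is proved, stated in full; the proofs are below) =====
def Claim_equal_solve : Prop := ∀ (input_grid : List (List Int)), Dom_solve input_grid → Pre_solve input_grid → Spec_solve input_grid (solve input_grid)

-- ===== LEMMAS AND PROOFS =====

-- row i of a grid as the proofs see it ([] when out of range)
def pvRow (g : List (List Int)) (i : Nat) : List Int := g[i]?.getD []

-- cell (i, j) with Nat indices
def pvCellN (g : List (List Int)) (i j : Nat) : Int := (pvRow g i)[j]?.getD 0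

theorem pvCell_natCast (g : List (List Int)) (i j : Nat) :
    pvCell g (i : Int) (j : Int) = pvCellN g i j := by
  simp [pvCell, pvCellN, pvRow, PySem.List.pyGetD_natCast, List.getD_eq_getElem?_getD]

-- the list of (nr, nc) targets A writes, in A's order
def pvWrites (g : List (List Int)) (rows cols : Int) : List (Int × Int) :=
  (PySem.List.pyRange 0 rows 1).flatMap (fun r =>
    (PySem.List.pyRange 0 cols 1).flatMap (fun c =>
      (if pvCell g r c = 8 then
        pvDirs.filterMap (fun d =>
          if 0 ≤ r + d.1 ∧ r + d.1 < rows ∧ 0 ≤ c + d.2 ∧ c + d.2 < cols ∧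
              pvCell g (r + d.1) (c + d.2) = 0 then some (r + d.1, c + d.2) else none)
      else [])))

theorem pv_foldl_flat {α β γ : Type} (L1 : List α) (F : α → List β) (step : γ → β → γ) (g0 : γ) :
    L1.foldl (fun g a => (F a).foldl step g) g0 = (L1.flatMap F).foldl step g0 := by
  induction L1 generalizing g0 with
  | nil => rfl
  | cons x xs ih => simp [List.flatMap_cons, List.foldl_append, ih]

theorem pv_ite_foldl {β γ : Type} (P : Prop) [Decidable P] (X : List β) (step : γ → β → γ) (g : γ) :
    (if P then X.foldl step g else g) = (if P then X else []).foldl step g := by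
  split <;> rfl

theorem pv_inner_dirs (ig : List (List Int)) (rows cols r c : Int) (g : List (List Int)) :
    pvDirs.foldl (fun g d =>
      if 0 ≤ r + d.1 ∧ r + d.1 < rows ∧ 0 ≤ c + d.2 ∧ c + d.2 < cols ∧
          pvCell ig (r + d.1) (c + d.2) = 0 then
        pvSet2 g (r + d.1) (c + d.2)
      else g) g
    = (pvDirs.filterMap (fun d =>
        if 0 ≤ r + d.1 ∧ r + d.1 < rows ∧ 0 ≤ c + d.2 ∧ c + d.2 < cols ∧
            pvCell ig (r + d.1) (c + d.2) = 0 then some (r + d.1, c + d.2) else none)).foldl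
        (fun acc p => pvSet2 acc p.1 p.2) g := by
  simp only [pvDirs, List.foldl_cons, List.filterMap_cons, List.foldl_nil, List.filterMap_nil]
  split_ifs <;> rfl

theorem pv_solve_eq_writes (g : List (List Int)) :
    solve g = (pvWrites g (g.length : Int) (((PySem.List.pyGet? g 0).getD []).length : Int)).foldl
      (fun acc p => pvSet2 acc p.1 p.2) g := by
  unfold solve pvWrites
  simp only [pv_inner_dirs, pv_ite_foldl, pv_foldl_flat]

theorem pv_writes_length (W : List (Int × Int)) (g0 : List (List Int)) :
    (W.foldl (fun acc p => pvSet2 acc p.1 p.2) g0).length = g0.length := by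
  induction W generalizing g0 with
  | nil => rfl
  | cons p W ih =>
    rw [List.foldl_cons, ih]
    simp [pvSet2, List.length_modify]

theorem pvRow_pvSet2_length (g : List (List Int)) (i j : Int) (k : Nat) :
    (pvRow (pvSet2 g i j) k).length = (pvRow g k).length := by
  simp only [pvRow, pvSet2, List.getElem?_modify]
  cases g[k]? with
  | none => rfl
  | some row => simp only [Option.getD_some]; split <;> simp [List.length_set]

theorem pv_writes_row_length (W : List (Int × Int)) (g0 : List (List Int)) (k : Nat) :
    (pvRow (W.foldl (fun acc p => pvSet2 acc p.1 p.2) g0) k).length = (pvRow g0 k).length := by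
  induction W generalizing g0 with
  | nil => rfl
  | cons p W ih => rw [List.foldl_cons, ih, pvRow_pvSet2_length]

theorem pvCellN_pvSet2 (g : List (List Int)) (i j : Int) (hi : 0 ≤ i) (hj : 0 ≤ j) (a b : Nat) :
    pvCellN (pvSet2 g i j) a b =
      if i = (a : Int) ∧ j = (b : Int) ∧ a < g.length ∧ b < (pvRow g a).length then 1
      else pvCellN g a b := by
  simp only [pvCellN, pvRow, pvSet2, List.getElem?_modify]
  cases hga : g[a]? with
  | none =>
    have hlen : ¬ a < g.length := by
      have := List.getElem?_eq_none_iff.mp hga; omega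
    simp [hga, hlen]
  | some row =>
    have hlen : a < g.length := (List.getElem?_eq_some_iff.mp hga).1
    by_cases hia : i.toNat = a
    · have hia' : i = (a : Int) := by omega
      simp only [hia, if_pos rfl, Option.map_some, Option.getD_some, List.getElem?_set]
      by_cases hjb : j.toNat = b
      · have hjb' : j = (b : Int) := by omega
        by_cases hb : b < row.length
        · simp [hjb, hb, hia', hjb', hlen, hga]
        · simp [hjb, hb, hia', hjb', hlen, hga]
      · have hjb' : ¬ j = (b : Int) := by omega
        simp [hjb, hjb', hga, hia']
    · have hia' : ¬ i = (a : Int) := by omega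
      simp [hia, hia', hga]

theorem pv_writes_cell (W : List (Int × Int)) (g0 : List (List Int))
    (hW : ∀ p ∈ W, 0 ≤ p.1 ∧ 0 ≤ p.2) (a b : Nat) :
    pvCellN (W.foldl (fun acc p => pvSet2 acc p.1 p.2) g0) a b =
      if (∃ p ∈ W, p.1 = (a : Int) ∧ p.2 = (b : Int)) ∧ a < g0.length ∧ b < (pvRow g0 a).length
      then 1 else pvCellN g0 a b := by
  induction W generalizing g0 with
  | nil => simp
  | cons p W ih =>
    rw [List.foldl_cons]
    have hp := hW p (List.mem_cons_self ..)
    rw [ih _ (fun q hq => hW q (List.mem_cons_of_mem _ hq))]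
    have hL : (pvSet2 g0 p.1 p.2).length = g0.length := by simp [pvSet2, List.length_modify]
    have hRL : (pvRow (pvSet2 g0 p.1 p.2) a).length = (pvRow g0 a).length :=
      pvRow_pvSet2_length g0 p.1 p.2 a
    rw [hL, hRL, pvCellN_pvSet2 g0 p.1 p.2 hp.1 hp.2 a b]
    by_cases hbnd : a < g0.length ∧ b < (pvRow g0 a).length
    · by_cases hex : ∃ q ∈ W, q.1 = (a : Int) ∧ q.2 = (b : Int)
      · rw [if_pos ⟨hex, hbnd⟩]
        have hc3 : (∃ q ∈ p :: W, q.1 = (a : Int) ∧ q.2 = (b : Int)) ∧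
            a < g0.length ∧ b < (pvRow g0 a).length :=
          ⟨⟨hex.choose, List.mem_cons_of_mem _ hex.choose_spec.1, hex.choose_spec.2⟩, hbnd⟩
        rw [if_pos hc3]
      · rw [if_neg (fun h => hex h.1)]
        by_cases hhit : p.1 = (a : Int) ∧ p.2 = (b : Int)
        · rw [if_pos ⟨hhit.1, hhit.2, hbnd.1, hbnd.2⟩]
          have hc3 : (∃ q ∈ p :: W, q.1 = (a : Int) ∧ q.2 = (b : Int)) ∧
              a < g0.length ∧ b < (pvRow g0 a).length :=
            ⟨⟨p, List.mem_cons_self .., hhit⟩, hbnd⟩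
          rw [if_pos hc3]
        · rw [if_neg (fun h => hhit ⟨h.1, h.2.1⟩)]
          have hc3 : ¬ ((∃ q ∈ p :: W, q.1 = (a : Int) ∧ q.2 = (b : Int)) ∧
              a < g0.length ∧ b < (pvRow g0 a).length) := by
            rintro ⟨⟨q, hqm, hq⟩, -⟩
            rcases List.mem_cons.mp hqm with rfl | hm
            · exact hhit hq
            · exact hex ⟨q, hm, hq⟩
          rw [if_neg hc3]
    · rw [if_neg (fun h => hbnd h.2), if_neg (fun h => hbnd ⟨h.2.2.1, h.2.2.2⟩),
        if_neg (fun h => hbnd h.2)]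

theorem pv_mem_writes (g : List (List Int)) (rows cols : Int) (x : Int × Int) :
    x ∈ pvWrites g rows cols ↔
      ∃ r c, (0 ≤ r ∧ r < rows) ∧ (0 ≤ c ∧ c < cols) ∧ pvCell g r c = 8 ∧
        ∃ d ∈ pvDirs, (0 ≤ r + d.1 ∧ r + d.1 < rows ∧ 0 ≤ c + d.2 ∧ c + d.2 < cols ∧
          pvCell g (r + d.1) (c + d.2) = 0) ∧ (r + d.1, c + d.2) = x := by
  simp only [pvWrites, List.mem_flatMap, List.mem_filterMap, PySem.List.mem_pyRange_one,
    List.mem_ite_nil_right, Option.ite_none_right_eq_some, Option.some_inj]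
  tauto

theorem pv_row_foldl_length (L : List Int) (Q : Int → Prop) [DecidablePred Q] (row : List Int) :
    (L.foldl (fun nr c => if Q c then nr.set c.toNat 1 else nr) row).length = row.length := by
  induction L generalizing row with
  | nil => rfl
  | cons c L ih =>
    rw [List.foldl_cons, ih]
    split <;> simp [List.length_set]

theorem pv_row_foldl (row : List Int) (Q : Int → Prop) [DecidablePred Q] (C : Nat) :
    ∀ b : Nat,
      ((PySem.List.pyRange 0 (C : Int) 1).foldl
        (fun nr c => if Q c then nr.set c.toNat 1 else nr) row)[b]? =
      if b < C ∧ Q (b : Int) ∧ b < row.length then some 1 else row[b]? := by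
  induction C with
  | zero =>
    intro b
    rw [show ((0 : Nat) : Int) = 0 by rfl, PySem.List.pyRange_one_eq_nil le_rfl]
    simp
  | succ C ih =>
    intro b
    have hcast : ((C + 1 : Nat) : Int) = (C : Int) + 1 := by push_cast; ring
    rw [hcast, PySem.List.pyRange_one_succ_right (by positivity), List.foldl_append,
      List.foldl_cons, List.foldl_nil]
    have hlen : ((PySem.List.pyRange 0 (C : Int) 1).foldl
        (fun nr c => if Q c then nr.set c.toNat 1 else nr) row).length = row.length :=
      pv_row_foldl_length _ _ _
    by_cases hQ : Q (C : Int)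
    · rw [if_pos hQ]
      rw [List.getElem?_set]
      by_cases hbC : b = C
      · subst hbC
        rw [if_pos (by omega), hlen]
        by_cases hb : b < row.length
        · rw [if_pos (by omega), if_pos ⟨by omega, hQ, hb⟩]
        · rw [if_neg (by omega), if_neg (by omega), List.getElem?_eq_none_iff.2 (by omega)]
      · rw [if_neg (by omega), ih b]
        by_cases h1 : b < C ∧ Q (b : Int) ∧ b < row.length
        · rw [if_pos h1, if_pos ⟨by omega, h1.2⟩]
        · rw [if_neg h1]
          rw [if_neg (by rintro ⟨hb1, hq, hb2⟩; exact h1 ⟨by omega, hq, hb2⟩)]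
    · rw [if_neg hQ, ih b]
      by_cases h1 : b < C ∧ Q (b : Int) ∧ b < row.length
      · rw [if_pos h1, if_pos ⟨by omega, h1.2⟩]
      · rw [if_neg h1]
        by_cases h2 : b < C + 1 ∧ Q (b : Int) ∧ b < row.length
        · exfalso
          by_cases hbC : b = C
          · exact hQ (by rw [← hbC]; exact h2.2.1)
          · exact h1 ⟨by omega, h2.2⟩
        · rw [if_neg h2]

theorem pv_enumerate_getElem? {α : Type} (xs : List α) (s : Int) (i : Nat) :
    (PySem.List.enumerate xs s)[i]? = xs[i]?.map (fun x => (s + (i : Int), x)) := by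
  induction xs generalizing s i with
  | nil => simp [PySem.List.enumerate_nil]
  | cons x xs ih =>
    cases i with
    | zero => simp [PySem.List.enumerate_cons]
    | succ n =>
      simp only [PySem.List.enumerate_cons, List.getElem?_cons_succ, ih]
      cases xs[n]? <;> simp <;> ring_nf

theorem pv_neg_mem_dirs (d : Int × Int) (h : d ∈ pvDirs) : (-d.1, -d.2) ∈ pvDirs := by
  simp only [pvDirs, List.mem_cons, List.not_mem_nil, or_false] at h ⊢
  rcases h with rfl | rfl | rfl | rfl <;> simp

theorem pvCellN_eq (g : List (List Int)) (i b : Nat) :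
    (pvRow g i)[b]?.getD 0 = pvCellN g i b := rfl

theorem pv_getElem?_def (l : List Int) (b : Nat) :
    l[b]? = if b < l.length then some (l[b]?.getD 0) else none := by
  by_cases h : b < l.length
  · simp [List.getElem?_eq_getElem h, h]
  · rw [List.getElem?_eq_none_iff.2 (Nat.le_of_not_lt h), if_neg h]

theorem pv_solve_eq_alt (g : List (List Int)) : solve g = solve_alt g := by
  rw [pv_solve_eq_writes g]
  simp only [solve_alt]
  apply List.ext_getElem?
  intro i
  rw [List.getElem?_map, pv_enumerate_getElem?]
  by_cases hi : i < g.length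
  · have hgi : g[i]? = some g[i] := List.getElem?_eq_getElem hi
    have hres : i < ((pvWrites g (g.length : Int)
        (((PySem.List.pyGet? g 0).getD []).length : Int)).foldl
        (fun acc p => pvSet2 acc p.1 p.2) g).length := by
      rw [pv_writes_length]; omega
    rw [hgi, List.getElem?_eq_getElem hres, Option.map_some, Option.map_some]
    simp only [zero_add]
    have hWnn : ∀ p ∈ pvWrites g (g.length : Int)
        (((PySem.List.pyGet? g 0).getD []).length : Int), 0 ≤ p.1 ∧ 0 ≤ p.2 := by
      intro p hp
      rcases (pv_mem_writes g _ _ p).1 hp with ⟨r, c, _, _, _, d, _, ⟨u1, _, u3, _, _⟩, he⟩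
      rw [← he]; exact ⟨u1, u3⟩
    have hpr : pvRow g i = g[i] := by simp [pvRow, hgi]
    have hq0 : ∀ b : Nat, PySem.List.pyGetD g[i] (b : Int) 0 = pvCellN g i b := by
      intro b
      simp [PySem.List.pyGetD_natCast, List.getD_eq_getElem?_getD, pvCellN, hpr]
    congr 1
    have hrowfix : ((pvWrites g (g.length : Int)
        (((PySem.List.pyGet? g 0).getD []).length : Int)).foldl
        (fun acc p => pvSet2 acc p.1 p.2) g)[i] = pvRow ((pvWrites g (g.length : Int)
        (((PySem.List.pyGet? g 0).getD []).length : Int)).foldl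
        (fun acc p => pvSet2 acc p.1 p.2) g) i := by
      simp [pvRow, List.getElem?_eq_getElem hres]
    rw [hrowfix]
    apply List.ext_getElem?
    intro b
    rw [pv_row_foldl, pv_getElem?_def (pvRow _ i) b, pv_writes_row_length, hpr]
    have hkey : (∃ p ∈ pvWrites g (g.length : Int)
          (((PySem.List.pyGet? g 0).getD []).length : Int),
          p.1 = (i : Int) ∧ p.2 = (b : Int)) ↔
        (b < ((PySem.List.pyGet? g 0).getD []).length ∧
          (PySem.List.pyGetD g[i] (b : Int) 0 = 0 ∧
            pvDirs.any (fun d =>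
              decide (0 ≤ (i : Int) + d.1) && decide ((i : Int) + d.1 < (g.length : Int)) &&
              decide (0 ≤ (b : Int) + d.2) &&
              decide ((b : Int) + d.2 < (((PySem.List.pyGet? g 0).getD []).length : Int)) &&
              decide (pvCell g ((i : Int) + d.1) ((b : Int) + d.2) = 8)) = true)) := by
      constructor
      · rintro ⟨p, hpW, hp1, hp2⟩
        rcases (pv_mem_writes g _ _ p).1 hpW with
          ⟨r, c, ⟨hr0, hrR⟩, ⟨hc0, hcC⟩, h8, d, hd, ⟨t1, t2, t3, t4, t0⟩, he⟩
        have e1 : r + d.1 = (i : Int) := by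
          have := congrArg Prod.fst he; simpa [hp1] using this
        have e2 : c + d.2 = (b : Int) := by
          have := congrArg Prod.snd he; simpa [hp2] using this
        refine ⟨by omega, ?_, ?_⟩
        · rw [hq0 b, ← pvCell_natCast, ← e1, ← e2]; exact t0
        · apply List.any_eq_true.2
          refine ⟨(-d.1, -d.2), pv_neg_mem_dirs d hd, ?_⟩
          simp only [Bool.and_eq_true, decide_eq_true_eq]
          have f1 : (i : Int) + -d.1 = r := by omega
          have f2 : (b : Int) + -d.2 = c := by omega
          refine ⟨⟨⟨⟨by omega, by omega⟩, by omega⟩, by omega⟩, ?_⟩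
          show pvCell g ((i : Int) + -d.1) ((b : Int) + -d.2) = 8
          rw [f1, f2]; exact h8
      · rintro ⟨hbC, hq0v, hany⟩
        rcases List.any_eq_true.1 hany with ⟨d, hd, hF⟩
        simp only [Bool.and_eq_true, decide_eq_true_eq] at hF
        obtain ⟨⟨⟨⟨u1, u2⟩, u3⟩, u4⟩, u8⟩ := hF
        refine ⟨((i : Int), (b : Int)), ?_, rfl, rfl⟩
        apply (pv_mem_writes g _ _ _).2
        refine ⟨(i : Int) + d.1, (b : Int) + d.2, ⟨u1, u2⟩, ⟨u3, u4⟩, u8,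
          (-d.1, -d.2), pv_neg_mem_dirs d hd,
          ⟨?_, ?_, ?_, ?_, ?_⟩, ?_⟩
        · show (0 : Int) ≤ (i : Int) + d.1 + -d.1; omega
        · show (i : Int) + d.1 + -d.1 < (g.length : Int); omega
        · show (0 : Int) ≤ (b : Int) + d.2 + -d.2; omega
        · show (b : Int) + d.2 + -d.2 < (((PySem.List.pyGet? g 0).getD []).length : Int); omega
        · show pvCell g ((i : Int) + d.1 + -d.1) ((b : Int) + d.2 + -d.2) = 0
          rw [show (i : Int) + d.1 + -d.1 = (i : Int) by ring,
            show (b : Int) + d.2 + -d.2 = (b : Int) by ring, pvCell_natCast, ← hq0 b]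
          exact hq0v
        · rw [show (i : Int) + d.1 + -d.1 = (i : Int) by ring,
            show (b : Int) + d.2 + -d.2 = (b : Int) by ring]
    by_cases hb : b < (g[i]).length
    · rw [if_pos hb, pvCellN_eq, pv_writes_cell _ _ hWnn i b, hpr]
      by_cases hex : ∃ p ∈ pvWrites g (g.length : Int)
          (((PySem.List.pyGet? g 0).getD []).length : Int),
          p.1 = (i : Int) ∧ p.2 = (b : Int)
      · rw [if_pos ⟨hex, hi, hb⟩]
        obtain ⟨hbc, hq⟩ := hkey.1 hex
        rw [if_pos ⟨hbc, hq, hb⟩]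
      · rw [if_neg (fun h => hex h.1), if_neg (fun h => hex (hkey.2 ⟨h.1, h.2.1⟩))]
        rw [List.getElem?_eq_getElem hb]
        simp [pvCellN, hpr, List.getElem?_eq_getElem hb]
    · have hnone : (g[i])[b]? = none := List.getElem?_eq_none_iff.2 (Nat.le_of_not_lt hb)
      rw [if_neg hb, if_neg (fun h => hb h.2.2), hnone]
  · have h1 : g[i]? = none := List.getElem?_eq_none_iff.2 (Nat.le_of_not_lt hi)
    have h2 : ((pvWrites g (g.length : Int)
        (((PySem.List.pyGet? g 0).getD []).length : Int)).foldl
        (fun acc p => pvSet2 acc p.1 p.2) g)[i]? = none := by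
      rw [List.getElem?_eq_none_iff, pv_writes_length]
      exact Nat.le_of_not_lt hi
    rw [h1, h2]
    rfl

-- ===== VERDICT (by name: the statement is the Claim_ definition above) =====
theorem solve_spec : Claim_equal_solve := by
  intro g _hDom _hPre
  unfold Spec_solve
  exact pv_solve_eq_alt g
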